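-- pv_equiv track=rewrite | github.com/Hilal-Anwar/Python_Tutorial | tutorial_2/triangle.py | get_reduced_factorization
-- ===== SOURCE A (Python) =====
-- from math import ceil, sqrt
--
-- def get_reduced_factorization(n: int, spf: list) -> int:
--     """
--     counts repetition of each prime from prime factorisation of N
--     using trial method upon spf list, and calculating the ceil of
--     half of all prime's powers (pow(p, ceil(a / 2))) and multiplying
--     them together.
--     """
--     gamma = 1
--     while (n != 1):
--         # keep a prime in prev variable
--         prev = spf[n]
--         # for counting the power
--         c = 0
--         # counts power of a prime
--         while spf[n] == prev:
--             c += 1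
--             n //= spf[n]
--         # multiplies the half ceil of power on primes
--         gamma *= pow(prev, ceil(c / 2))
--         prev = spf[n]
--     return gamma
-- ===== SOURCE B (Python) =====
-- def get_reduced_factorization(n: int, spf: list) -> int:
--     # phase 1: fully factorize n into the ordered list of prime factors
--     factors = []
--     while n != 1:
--         p = spf[n]
--         factors.append(p)
--         n //= p
--     # phase 2: aggregate each run of equal factors into p ** ceil(run/2)
--     gamma = 1
--     rest = factors
--     while rest:
--         p = rest[0]
--         c = 1
--         while c < len(rest) and rest[c] == p:
--             c += 1
--         gamma *= p ** ((c + 1) // 2)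
--         rest = rest[c:]
--     return gamma
-- ===== Notes on version B (the rewrite author's own statement) =====
-- stated objective: alternative
-- what changed: A's single interleaved loop that counts a prime's power while multiplying is split into two separate passes: phase 1 fully factorizes n into an ordered factor list via spf, phase 2 scans that list run by run and multiplies p ** ceil(run/2).
-- outside the precondition, e.g. on get_reduced_factorization(12, [9, 0, 2, 3, 2, 0, 3, 0, 0, 0, 0, 0, 2]): A returns 12, B returns 12
import Mathlib
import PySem

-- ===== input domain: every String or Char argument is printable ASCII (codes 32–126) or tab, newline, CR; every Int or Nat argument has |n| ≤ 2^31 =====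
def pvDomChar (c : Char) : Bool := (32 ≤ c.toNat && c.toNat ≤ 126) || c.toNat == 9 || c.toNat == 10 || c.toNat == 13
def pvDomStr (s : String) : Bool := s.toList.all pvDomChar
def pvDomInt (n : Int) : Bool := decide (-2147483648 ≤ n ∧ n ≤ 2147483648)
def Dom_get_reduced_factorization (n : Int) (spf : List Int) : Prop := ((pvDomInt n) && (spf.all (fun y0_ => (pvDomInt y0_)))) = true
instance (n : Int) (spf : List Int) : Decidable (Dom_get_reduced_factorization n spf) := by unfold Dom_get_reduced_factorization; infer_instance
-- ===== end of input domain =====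

-- B splits A's interleaved count-and-multiply loop into a factorize pass followed by a run-aggregation pass (same cost, different structure).


-- ===== PORT A =====
-- inner 'while spf[n] == prev: c += 1; n //= spf[n]'; returns (c, n).
-- Fuel bounds the iterations (under Pre_ the chain value strictly decreases, so n.toNat fuel suffices);
-- a 'none' lookup is Python's IndexError, excluded by Pre_.
def pvAInner (fuel : Nat) (prev : Int) (n : Int) (spf : List Int) (c : Int) : Int × Int :=
  match fuel with
  | 0 => (c, n)
  | fuel + 1 =>
    match PySem.List.pyGet? spf n with
    | none => (c, n)   -- IndexError in Python; outside Pre_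
    | some q =>
      if q = prev then pvAInner fuel prev (PySem.Int.floordiv n q) spf (c + 1)
      else (c, n)

-- outer 'while n != 1' loop; ceil(c / 2) = (c + 1) // 2 exactly, since c ≥ 0 is an int count.
def pvAOuter (fuel : Nat) (n : Int) (spf : List Int) (gamma : Int) : Int :=
  match fuel with
  | 0 => gamma
  | fuel + 1 =>
    if n = 1 then gamma
    else
      match PySem.List.pyGet? spf n with
      | none => gamma   -- IndexError in Python; outside Pre_
      | some prev =>
        let r := pvAInner fuel prev n spf 0
        match PySem.List.pyGet? spf r.2 with   -- trailing dead 'prev = spf[n]' (can raise IndexError)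
        | none => gamma   -- IndexError in Python; outside Pre_
        | some _ => pvAOuter fuel r.2 spf (gamma * prev ^ ((r.1.toNat + 1) / 2))

def get_reduced_factorization (n : Int) (spf : List Int) : Int :=
  pvAOuter (n.toNat + 1) n spf 1

-- ===== PORT B =====
-- phase 1: 'while n != 1: factors.append(spf[n]); n //= spf[n]' (fuel as above)
def pvBFactor (fuel : Nat) (n : Int) (spf : List Int) : List Int :=
  match fuel with
  | 0 => []
  | fuel + 1 =>
    if n = 1 then []
    else
      match PySem.List.pyGet? spf n with
      | none => []   -- IndexError in Python; outside Pre_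
      | some p => p :: pvBFactor fuel (PySem.Int.floordiv n p) spf

-- phase 2: consume the leading run of equal factors (Source B's inner index scan computes
-- exactly this run: takeWhile/dropWhile on the tail), multiply p ** ((c + 1) // 2), recurse on the rest.
def pvBAgg (l : List Int) : Int :=
  match l with
  | [] => 1
  | p :: t =>
    let c : Nat := (t.takeWhile (fun q => q == p)).length + 1
    p ^ ((c + 1) / 2) * pvBAgg (t.dropWhile (fun q => q == p))
termination_by l.length
decreasing_by
  exact Nat.lt_succ_of_le (List.length_dropWhile_le _ _)

def get_reduced_factorization_alt (n : Int) (spf : List Int) : Int :=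
  pvBAgg (pvBFactor (n.toNat + 1) n spf)

-- ===== PRECONDITION & SPEC =====
-- pvGood: spf is a well-formed factor table for n: long enough, spf[1] ≤ 1 (so the inner loop
-- stops at 1), and every index 2..n holds a divisor ≥ 2 of its index.
def pvGood (N : Int) (spf : List Int) : Prop :=
  N.toNat < spf.length ∧
  ∀ i : Fin spf.length,
    ((i : Nat) = 1 → spf.get i ≤ 1) ∧
    (2 ≤ (i : Nat) → (i : Nat) ≤ N.toNat → 2 ≤ spf.get i ∧ spf.get i ∣ ((i : Nat) : Int))

-- Pre_ restricts to well-formed smallest-factor tables (the function's intended domain): on malformed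
-- tables A may index out of range, divide by zero or loop forever; on malformed tables where A happens
-- to return, B returns the same value (see the cite), so the exclusion only serves the termination proof.
def Pre_get_reduced_factorization (n : Int) (spf : List Int) : Prop :=
  1 ≤ n ∧ (n = 1 ∨ pvGood n spf)
instance (n : Int) (spf : List Int) : Decidable (Pre_get_reduced_factorization n spf) := by
  unfold Pre_get_reduced_factorization pvGood; infer_instance

def pvWitness_get_reduced_factorization : Int × List Int :=
  (12, [0, 1, 2, 3, 2, 5, 2, 7, 2, 3, 2, 11, 2])

def Spec_get_reduced_factorization (n : Int) (spf : List Int) (out : Int) : Prop := out = get_reduced_factorization_alt n spf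
instance (n : Int) (spf : List Int) (out : Int) : Decidable (Spec_get_reduced_factorization n spf out) := by unfold Spec_get_reduced_factorization; infer_instance

-- ===== CLAIM (what is proved, stated in full; the proofs are below) =====
def Claim_equal_get_reduced_factorization : Prop := ∀ (n : Int) (spf : List Int), Dom_get_reduced_factorization n spf → Pre_get_reduced_factorization n spf → Spec_get_reduced_factorization n spf (get_reduced_factorization n spf)

-- ===== LEMMAS AND PROOFS =====

-- one division step: n // p is in [1, n) when 2 ≤ p ∣ n
theorem pvStep (n p : Int) (h2 : 2 ≤ n) (hp : 2 ≤ p) (hdvd : p ∣ n) :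
    1 ≤ PySem.Int.floordiv n p ∧ PySem.Int.floordiv n p < n := by
  obtain ⟨k, hk⟩ := hdvd
  rw [PySem.Int.floordiv_eq_ediv_of_pos (by omega), hk,
    Int.mul_ediv_cancel_left _ (by omega : p ≠ 0)]
  constructor <;> nlinarith

-- the canonical factor chain (proof-side only)
def pvFacs (n : Int) (spf : List Int) : List Int :=
  if hc : 2 ≤ n ∧ n.toNat < spf.length ∧ 2 ≤ spf[n.toNat]! ∧ spf[n.toNat]! ∣ n then
    spf[n.toNat]! :: pvFacs (PySem.Int.floordiv n spf[n.toNat]!) spf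
  else []
termination_by n.toNat
decreasing_by
  have := pvStep n spf[n.toNat]! hc.1 hc.2.2.1 hc.2.2.2
  omega

theorem pvFacs_one (spf : List Int) : pvFacs 1 spf = [] := by
  rw [pvFacs, dif_neg]
  intro h
  exact absurd h.1 (by norm_num)

theorem pvGood_get {N n : Int} {spf : List Int} (hg : pvGood N spf)
    (h2 : 2 ≤ n) (hle : n ≤ N) :
    PySem.List.pyGet? spf n = some spf[n.toNat]! ∧ 2 ≤ spf[n.toNat]! ∧ spf[n.toNat]! ∣ n := by
  obtain ⟨hlen, htab⟩ := hg
  have hlt : n.toNat < spf.length := by omega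
  have hfin := (htab ⟨n.toNat, hlt⟩).2 (show 2 ≤ n.toNat by omega) (show n.toNat ≤ N.toNat by omega)
  simp only [List.get_eq_getElem] at hfin
  rw [getElem!_pos spf n.toNat hlt]
  refine ⟨PySem.List.pyGet?_eq_some_getElem spf (show (0:Int) ≤ n by omega)
    (show n < (spf.length : Int) by omega), hfin.1, ?_⟩
  have hcast : ((n.toNat : Nat) : Int) = n := Int.toNat_of_nonneg (by omega)
  rw [hcast] at hfin
  exact hfin.2

theorem pvGood_one {N : Int} {spf : List Int} (hg : pvGood N spf) (hN2 : 2 ≤ N) :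
    PySem.List.pyGet? spf 1 = some spf[1]! ∧ spf[1]! ≤ 1 := by
  obtain ⟨hlen, htab⟩ := hg
  have hlt : 1 < spf.length := by omega
  have hfin := (htab ⟨1, hlt⟩).1 rfl
  simp only [List.get_eq_getElem] at hfin
  rw [getElem!_pos spf 1 hlt]
  exact ⟨PySem.List.pyGet?_eq_some_getElem spf (show (0:Int) ≤ 1 by omega)
    (show (1:Int) < (spf.length : Int) by omega), hfin⟩

theorem pvFacs_cons {N n : Int} {spf : List Int} (hg : pvGood N spf) (h2 : 2 ≤ n) (hle : n ≤ N) :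
    pvFacs n spf = spf[n.toNat]! :: pvFacs (PySem.Int.floordiv n spf[n.toNat]!) spf := by
  obtain ⟨_, hp2, hdvd⟩ := pvGood_get hg h2 hle
  rw [pvFacs, dif_pos ⟨h2, by have := hg.1; omega, hp2, hdvd⟩]

theorem pvInner_facs {N : Int} {spf : List Int} (hg : pvGood N spf) (hN2 : 2 ≤ N) :
    ∀ (f : Nat) (n p c : Int), 1 ≤ n → n ≤ N → 2 ≤ p → n.toNat ≤ f →
    ∃ (r : Nat) (n' : Int),
      pvAInner f p n spf c = (c + (r : Int), n') ∧
      1 ≤ n' ∧ n' ≤ n ∧ (r = 0 → n' = n) ∧ (1 ≤ r → n' < n) ∧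
      pvFacs n spf = List.replicate r p ++ pvFacs n' spf ∧
      (n' = 1 ∨ spf[n'.toNat]! ≠ p) := by
  intro f
  induction f with
  | zero => intro n p c h1 hle hp hf; omega
  | succ f ih =>
    intro n p c h1 hle hp hf
    by_cases hn1 : n = 1
    · subst hn1
      obtain ⟨hg1, hle1⟩ := pvGood_one hg hN2
      refine ⟨0, 1, ?_, by omega, by omega, fun _ => rfl, by omega, by simp, Or.inl rfl⟩
      simp only [pvAInner, hg1]
      rw [if_neg (show ¬ spf[1]! = p by omega)]
      norm_num
    · have h2 : 2 ≤ n := by omega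
      obtain ⟨hget, hp2, hdvd⟩ := pvGood_get hg h2 hle
      by_cases hqp : spf[n.toNat]! = p
      · have hstep := pvStep n spf[n.toNat]! h2 hp2 hdvd
        obtain ⟨r, n', heq, a1, a2, a3, a6, a4, a5⟩ :=
          ih (PySem.Int.floordiv n spf[n.toNat]!) p (c + 1) (by omega) (by omega) hp (by omega)
        refine ⟨r + 1, n', ?_, a1, by omega, by omega, by omega, ?_, a5⟩
        · simp only [pvAInner, hget]
          rw [if_pos hqp, heq]
          congr 1
          push_cast
          ring
        · rw [pvFacs_cons hg h2 hle, a4, hqp, List.replicate_succ, List.cons_append]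
      · refine ⟨0, n, ?_, h1, le_refl n, fun _ => rfl, by omega, by simp, Or.inr hqp⟩
        simp only [pvAInner, hget, if_neg hqp]
        simp

theorem pvTakeDrop (p : Int) (rest : List Int)
    (hrest : rest = [] ∨ ∃ q t, rest = q :: t ∧ q ≠ p) :
    ∀ k : Nat, (List.replicate k p ++ rest).takeWhile (fun q => q == p) = List.replicate k p ∧
      (List.replicate k p ++ rest).dropWhile (fun q => q == p) = rest := by
  intro k
  induction k with
  | zero =>
    rcases hrest with h | ⟨q, t, rfl, hq⟩
    · subst h; simp
    · simp [hq]
  | succ k ihk =>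
    rw [List.replicate_succ, List.cons_append]
    simp only [List.takeWhile, List.dropWhile, BEq.rfl]
    exact ⟨by rw [ihk.1], by rw [ihk.2]⟩

theorem pvBAgg_run (p : Int) (r : Nat) (rest : List Int) (hr : 1 ≤ r)
    (hrest : rest = [] ∨ ∃ q t, rest = q :: t ∧ q ≠ p) :
    pvBAgg (List.replicate r p ++ rest) = p ^ ((r + 1) / 2) * pvBAgg rest := by
  obtain ⟨k, rfl⟩ : ∃ k, r = k + 1 := ⟨r - 1, by omega⟩
  rw [List.replicate_succ, List.cons_append, pvBAgg]
  rw [(pvTakeDrop p rest hrest k).1, (pvTakeDrop p rest hrest k).2]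
  simp [List.length_replicate]

theorem pvOuter_facs {N : Int} {spf : List Int} (hg : pvGood N spf) (hN2 : 2 ≤ N) :
    ∀ (f : Nat) (n gamma : Int), 1 ≤ n → n ≤ N → n.toNat < f →
    pvAOuter f n spf gamma = gamma * pvBAgg (pvFacs n spf) := by
  intro f
  induction f with
  | zero => intro n gamma h1 hle hf; omega
  | succ f ih =>
    intro n gamma h1 hle hf
    by_cases hn1 : n = 1
    · subst hn1
      rw [show pvAOuter (f + 1) 1 spf gamma = gamma from by simp [pvAOuter],
        pvFacs_one, show pvBAgg [] = 1 from by rw [pvBAgg]]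
      ring
    · have h2 : 2 ≤ n := by omega
      obtain ⟨hget, hp2, hdvd⟩ := pvGood_get hg h2 hle
      obtain ⟨r, n', heq, a1, a2, a3, a6, a4, a5⟩ :=
        pvInner_facs hg hN2 f n spf[n.toNat]! 0 h1 hle hp2 (by omega)
      have hr1 : 1 ≤ r := by
        by_contra hr
        have hn'n := a3 (by omega)
        subst hn'n
        rcases a5 with h | h
        · exact hn1 h
        · exact h rfl
      have hrest : pvFacs n' spf = [] ∨
          ∃ q t, pvFacs n' spf = q :: t ∧ q ≠ spf[n.toNat]! := by
        by_cases hn'1 : n' = 1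
        · exact Or.inl (by rw [hn'1, pvFacs_one])
        · rcases a5 with h | h
          · exact absurd h hn'1
          · exact Or.inr ⟨spf[n'.toNat]!, _, pvFacs_cons hg (by omega) (by omega), h⟩
      obtain ⟨v, hv⟩ : ∃ v, PySem.List.pyGet? spf n' = some v := by
        by_cases hn'1 : n' = 1
        · exact ⟨spf[1]!, by rw [hn'1]; exact (pvGood_one hg hN2).1⟩
        · exact ⟨spf[n'.toNat]!, (pvGood_get hg (by omega) (by omega)).1⟩
      simp only [pvAOuter, if_neg hn1, hget, heq, hv]
      rw [ih n' _ a1 (by omega) (by omega), a4,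
        pvBAgg_run spf[n.toNat]! r (pvFacs n' spf) hr1 hrest,
        show ((0 + (r : Int)).toNat + 1) / 2 = (r + 1) / 2 from by omega]
      ring

theorem pvBFactor_facs {N : Int} {spf : List Int} (hg : pvGood N spf) :
    ∀ (f : Nat) (n : Int), 1 ≤ n → n ≤ N → n.toNat ≤ f →
    pvBFactor f n spf = pvFacs n spf := by
  intro f
  induction f with
  | zero => intro n h1 hle hf; omega
  | succ f ih =>
    intro n h1 hle hf
    by_cases hn1 : n = 1
    · subst hn1
      rw [pvFacs_one]
      simp [pvBFactor]
    · have h2 : 2 ≤ n := by omega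
      obtain ⟨hget, hp2, hdvd⟩ := pvGood_get hg h2 hle
      have hstep := pvStep n spf[n.toNat]! h2 hp2 hdvd
      simp only [pvBFactor, if_neg hn1, hget]
      rw [ih _ (by omega) (by omega) (by omega), pvFacs_cons hg h2 hle]

theorem get_reduced_factorization_spec : Claim_equal_get_reduced_factorization := by
  intro n spf _hdom hpre
  unfold Spec_get_reduced_factorization
  obtain ⟨h1, hor⟩ := hpre
  by_cases hn1 : n = 1
  · subst hn1
    simp [get_reduced_factorization, get_reduced_factorization_alt, pvAOuter, pvBFactor, pvBAgg]
  · have hg : pvGood n spf := by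
      rcases hor with h | h
      · exact absurd h hn1
      · exact h
    have h2 : 2 ≤ n := by omega
    rw [get_reduced_factorization, get_reduced_factorization_alt,
      pvOuter_facs hg h2 (n.toNat + 1) n 1 h1 le_rfl (by omega),
      pvBFactor_facs hg (n.toNat + 1) n h1 le_rfl (by omega), one_mul]
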